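-- pv_equiv track=rewrite | github.com/FrancescoMezzacasa/Universita | Programmazione/Ripetizioni/P5V2.py | sost
-- ===== SOURCE A (Python) =====
-- def sost(text):
--     '''
--     (str) -> str
--
--     >>> sost('E nst?!?in')
--     'E1nst3in'
--     >>> sost('K12345678901234J')
--     'K14J'
--     >>> sost('2 rimane 2')
--     '2rimane2'
--     '''
--
--     count = 0 #conto quanti non alfabetici
--     ris = ''
--     for i in range(len(text)):
--         if(not text[i].isalpha()): #se è un carattere strano contalo
--             count += 1
--         else: #se è una lettera
--             if(count > 0): #se hai gia visto qualche simbolo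
--                 ris +=  str(count) #aggiungi il conto dei simboli visti finora
--                 count = 0 #resetta il count
--             ris += text[i] #e in ogni caso aggiungi la lettera
--     if(count > 0): #se sei alla fine (fuori dal for) e hai un conto
--                     #vuol dire che finiva con un simbolo quinfdi aggiungi il count
--         ris += str(count)
--     return ris
-- ===== SOURCE B (Python) =====
-- def sost(text):
--     parts = []
--     i = 0
--     n = len(text)
--     while i < n:
--         j = i
--         if text[i].isalpha():
--             while j < n and text[j].isalpha():
--                 j += 1
--             parts.append(text[i:j])
--         else:
--             while j < n and not text[j].isalpha():
--                 j += 1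
--             parts.append(str(j - i))
--         i = j
--     return ''.join(parts)
-- ===== Notes on version B (the rewrite author's own statement) =====
-- stated objective: alternative
-- what changed: Replaced the per-character counter/flush state machine with run-grouping: an index loop that takes each maximal alphabetic / non-alphabetic run at once (slice or run length) and joins the parts.
import Mathlib
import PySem

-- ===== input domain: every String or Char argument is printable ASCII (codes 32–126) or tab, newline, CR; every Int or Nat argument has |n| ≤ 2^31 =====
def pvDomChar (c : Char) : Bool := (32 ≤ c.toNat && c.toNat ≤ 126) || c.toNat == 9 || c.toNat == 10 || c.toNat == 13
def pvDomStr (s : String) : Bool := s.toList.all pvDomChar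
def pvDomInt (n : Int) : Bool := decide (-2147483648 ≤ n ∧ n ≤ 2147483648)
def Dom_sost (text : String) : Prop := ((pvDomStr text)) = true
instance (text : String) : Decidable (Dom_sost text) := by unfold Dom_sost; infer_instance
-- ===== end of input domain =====

-- B replaces A's per-character counter/flush state machine by grouping the string into
-- maximal alphabetic / non-alphabetic runs and joining the parts (alternative decomposition, same cost).

-- ===== PORT A =====
-- one loop step of A's for-loop: state = (count, ris)
def sostStep (st : Int × List Char) (c : Char) : Int × List Char :=
  if !(PySem.Chars.isalpha c) then (st.1 + 1, st.2)
  else if st.1 > 0 then (0, st.2 ++ PySem.Int.toChars st.1 ++ [c])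
  else (st.1, st.2 ++ [c])

def sost (text : String) : String :=
  let st := text.toList.foldl sostStep (0, [])
  String.ofList (if st.1 > 0 then st.2 ++ PySem.Int.toChars st.1 else st.2)

-- ===== PORT B =====
-- the list of parts B appends: a maximal alphabetic run verbatim, a non-alphabetic run as its length
def sostRuns (cs : List Char) : List (List Char) :=
  match cs with
  | [] => []
  | c :: rest =>
    if PySem.Chars.isalpha c then
      (c :: rest.takeWhile (fun d => PySem.Chars.isalpha d))
        :: sostRuns (rest.dropWhile (fun d => PySem.Chars.isalpha d))
    else
      PySem.Int.toChars ((1 + (rest.takeWhile (fun d => !PySem.Chars.isalpha d)).length : Nat) : Int)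
        :: sostRuns (rest.dropWhile (fun d => !PySem.Chars.isalpha d))
termination_by cs.length
decreasing_by
  all_goals simp only [List.length_cons]
  all_goals exact Nat.lt_succ_of_le (List.length_dropWhile_le _ _)

def sost_alt (text : String) : String :=
  String.ofList (sostRuns text.toList).flatten

-- ===== PRECONDITION & SPEC =====
def Spec_sost (text : String) (out : String) : Prop := out = sost_alt text
instance (text : String) (out : String) : Decidable (Spec_sost text out) := by unfold Spec_sost; infer_instance

-- ===== CLAIM (what is proved, stated in full; the proofs are below) =====
def Claim_equal_sost : Prop := ∀ (text : String), Dom_sost text → Spec_sost text (sost text)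

-- ===== LEMMAS AND PROOFS =====

-- the remaining output of A given the pending non-alpha count n
def sostTail : List Char → Nat → List Char
  | [], n => if 0 < n then PySem.Int.toChars (n : Int) else []
  | c :: cs, n =>
    if PySem.Chars.isalpha c then
      (if 0 < n then PySem.Int.toChars (n : Int) else []) ++ c :: sostTail cs 0
    else sostTail cs (n + 1)

lemma sost_foldl_eq_tail (cs : List Char) : ∀ (n : Nat) (ris : List Char),
    (let st := cs.foldl sostStep ((n : Int), ris);
     if st.1 > 0 then st.2 ++ PySem.Int.toChars st.1 else st.2) = ris ++ sostTail cs n := by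
  induction cs with
  | nil =>
    intro n ris
    simp only [List.foldl_nil, sostTail]
    by_cases h : 0 < n
    · simp [h]
    · simp [h]
  | cons c cs ih =>
    intro n ris
    simp only [List.foldl_cons, sostStep, sostTail]
    by_cases hc : PySem.Chars.isalpha c
    · simp only [hc, Bool.not_true, Bool.false_eq_true, if_false, if_true]
      by_cases hn : 0 < n
      · have hi : ((n : Int) > 0) := by exact_mod_cast hn
        simp only [hi, if_pos, hn]
        have := ih 0 (ris ++ PySem.Int.toChars (n : Int) ++ [c])
        simpa using this
      · have hi : ¬((n : Int) > 0) := by exact_mod_cast hn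
        have hn0 : n = 0 := by omega
        subst hn0
        simp only [hi, if_false, Nat.lt_irrefl]
        have := ih 0 (ris ++ [c])
        simpa using this
    · simp only [hc, Bool.not_false, if_true]
      have hcast : ((n : Int) + 1) = ((n + 1 : Nat) : Int) := by push_cast; ring
      rw [hcast]
      exact ih (n + 1) ris

-- an alphabetic run passes through sostTail verbatim
lemma sostTail_alpha_run (us : List Char) (rest : List Char)
    (h : ∀ u ∈ us, PySem.Chars.isalpha u = true) :
    sostTail (us ++ rest) 0 = us ++ sostTail rest 0 := by
  induction us with
  | nil => simp
  | cons u us ih =>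
    have hu := h u (by simp)
    simp only [List.cons_append, sostTail, hu, if_true, Nat.lt_irrefl, if_false]
    simp [ih (fun x hx => h x (by simp [hx]))]

-- a non-alphabetic run adds its length to the pending count, which is flushed at its end
lemma sostTail_nonalpha_run (us : List Char) :
    ∀ (n : Nat) (rest : List Char),
    (∀ u ∈ us, PySem.Chars.isalpha u = false) →
    (rest = [] ∨ ∃ d ds, rest = d :: ds ∧ PySem.Chars.isalpha d = true) →
    sostTail (us ++ rest) (n + 1)
      = PySem.Int.toChars ((n + 1 + us.length : Nat) : Int) ++ sostTail rest 0 := by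
  induction us with
  | nil =>
    intro n rest _ hrest
    rcases hrest with rfl | ⟨d, ds, rfl, hd⟩
    · simp [sostTail]
    · simp [sostTail, hd]
  | cons u us ih =>
    intro n rest h hrest
    have hu := h u (by simp)
    simp only [List.cons_append, sostTail, hu, Bool.false_eq_true, if_false]
    rw [ih (n + 1) rest (fun x hx => h x (by simp [hx])) hrest]
    simp only [List.length_cons]
    congr 2
    omega

lemma sostTail_eq_flatten (cs : List Char) : sostTail cs 0 = (sostRuns cs).flatten := by
  induction hlen : cs.length using Nat.strong_induction_on generalizing cs with
  | _ N IH =>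
  match cs, hlen with
  | [], _ => simp [sostTail, sostRuns]
  | c :: rest, hlen =>
    by_cases hc : PySem.Chars.isalpha c
    · rw [sostRuns]
      simp only [if_pos hc, List.flatten_cons]
      have hmem : ∀ u ∈ c :: rest.takeWhile (fun d => PySem.Chars.isalpha d),
          PySem.Chars.isalpha u = true := by
        intro u hu
        rcases List.mem_cons.mp hu with rfl | hu
        · exact hc
        · exact List.mem_takeWhile_imp hu
      have hsplit : c :: rest
          = (c :: rest.takeWhile (fun d => PySem.Chars.isalpha d))
            ++ rest.dropWhile (fun d => PySem.Chars.isalpha d) := by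
        simp [List.takeWhile_append_dropWhile]
      have hlt : (rest.dropWhile (fun d => PySem.Chars.isalpha d)).length < N := by
        have := List.length_dropWhile_le (fun d => PySem.Chars.isalpha d) rest
        simp only [List.length_cons] at hlen
        omega
      conv_lhs => rw [hsplit]
      rw [sostTail_alpha_run _ _ hmem,
          IH _ hlt _ rfl]
    · rw [sostRuns]
      simp only [if_neg hc, List.flatten_cons]
      have hsplit : rest
          = rest.takeWhile (fun d => !PySem.Chars.isalpha d)
            ++ rest.dropWhile (fun d => !PySem.Chars.isalpha d) := by
        simp [List.takeWhile_append_dropWhile]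
      have hrest : rest.dropWhile (fun d => !PySem.Chars.isalpha d) = []
          ∨ ∃ d ds, rest.dropWhile (fun d => !PySem.Chars.isalpha d) = d :: ds
              ∧ PySem.Chars.isalpha d = true := by
        cases hdw : rest.dropWhile (fun d => !PySem.Chars.isalpha d) with
        | nil => exact Or.inl rfl
        | cons d ds =>
          refine Or.inr ⟨d, ds, rfl, ?_⟩
          have := List.head_dropWhile_not (p := fun d => !PySem.Chars.isalpha d) (l := rest)
          simp [hdw] at this
          simpa using this
      have hlt : (rest.dropWhile (fun d => !PySem.Chars.isalpha d)).length < N := by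
        have := List.length_dropWhile_le (fun d => !PySem.Chars.isalpha d) rest
        simp only [List.length_cons] at hlen
        omega
      simp only [sostTail, hc, Bool.false_eq_true, if_false]
      conv_lhs => rw [hsplit]
      rw [show (0 : Nat) + 1 = 0 + 1 from rfl,
          sostTail_nonalpha_run _ 0 _ (fun u hu => by
            have := List.mem_takeWhile_imp hu; simpa using this) hrest,
          IH _ hlt _ rfl]

-- ===== VERDICT (by name: the statement is the Claim_ definition above) =====
theorem sost_spec : Claim_equal_sost := by
  intro text _
  unfold Spec_sost
  simp only [sost, sost_alt]
  have h := sost_foldl_eq_tail text.toList 0 []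
  simp only [Nat.cast_zero, List.nil_append] at h
  rw [h, sostTail_eq_flatten]
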